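-- pv_equiv track=rewrite | github.com/ASA11599/Scripts | src/keep_border_islands.py | keep_border_islands
-- ===== SOURCE A (Python) =====
-- def keep_border_islands(matrix: list[list[int]]) -> list[list[int]]:
--     def get_neighbors(pos: tuple[int, int]) -> list[tuple[int, int]]:
--         neighbors: list[tuple[int, int]] = []
--         if pos[0] != 0:
--             neighbors.append((pos[0] - 1, pos[1]))
--         if pos[0] != (len(matrix) - 1):
--             neighbors.append((pos[0] + 1, pos[1]))
--         if pos[1] != 0:
--             neighbors.append((pos[0], pos[1] - 1))
--         if pos[1] != (len(matrix[pos[0]]) - 1):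
--             neighbors.append((pos[0], pos[1] + 1))
--         return neighbors
--     result: list[list[int]] = [[0 for i in row] for row in matrix]
--     visited: list[list[bool]] = [[False for i in row] for row in matrix]
--     for ri in range(len(matrix)):
--         for ci in range(len(matrix[ri])):
--             on_border: bool = (ri == 0 or ri == (len(matrix) - 1)) or (ci == 0 or ci == (len(matrix[ri]) - 1))
--             if on_border and matrix[ri][ci] == 1:
--                 visited[ri][ci] = True
--                 result[ri][ci] = 1
--                 queue: list[tuple[int, int]] = get_neighbors((ri, ci))
--                 while len(queue) > 0:
--                     current: tuple[int, int] = queue.pop(0)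
--                     if (matrix[current[0]][current[1]] == 1) and not visited[current[0]][current[1]]:
--                         visited[current[0]][current[1]] = True
--                         result[current[0]][current[1]] = 1
--                         queue += [n for n in get_neighbors(current) if (matrix[n[0]][n[1]])]
--     return result
-- ===== SOURCE B (Python) =====
-- def keep_border_islands(matrix: list[list[int]]) -> list[list[int]]:
--     n = sum(len(row) for row in matrix)
--
--     def at(keep, r, c):
--         return 0 <= r < len(matrix) and 0 <= c < len(matrix[r]) and keep[r][c] == 1
--
--     keep = [[1 if v == 1 and (r == 0 or r == len(matrix) - 1 or c == 0 or c == len(row) - 1) else 0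
--              for c, v in enumerate(row)] for r, row in enumerate(matrix)]
--     for _ in range(n):
--         new = [[1 if v == 1 and (keep[r][c] == 1 or at(keep, r - 1, c) or at(keep, r + 1, c)
--                                  or at(keep, r, c - 1) or at(keep, r, c + 1)) else 0
--                 for c, v in enumerate(row)] for r, row in enumerate(matrix)]
--         if new == keep:
--             break
--         keep = new
--     return keep
-- ===== Notes on version B (the rewrite author's own statement) =====
-- stated objective: alternative
-- what changed: Replaces A's per-border-source BFS with explicit queue and visited matrix by whole-matrix label propagation: start from the border 1-cells and repeatedly sweep the matrix, keeping a 1-cell iff it was kept or an in-range 4-neighbour was kept, until the kept matrix stabilises.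
import Mathlib
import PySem

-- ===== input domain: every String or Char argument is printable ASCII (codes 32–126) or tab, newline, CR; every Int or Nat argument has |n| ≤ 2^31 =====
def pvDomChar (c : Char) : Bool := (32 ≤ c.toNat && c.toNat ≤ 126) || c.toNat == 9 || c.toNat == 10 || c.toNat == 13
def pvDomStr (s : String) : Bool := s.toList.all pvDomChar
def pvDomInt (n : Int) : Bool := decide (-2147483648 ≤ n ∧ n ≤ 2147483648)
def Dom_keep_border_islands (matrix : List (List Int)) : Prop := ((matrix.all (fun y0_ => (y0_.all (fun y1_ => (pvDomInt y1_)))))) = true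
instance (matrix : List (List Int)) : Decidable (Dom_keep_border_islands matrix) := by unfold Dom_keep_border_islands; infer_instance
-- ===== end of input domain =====

-- B replaces A's per-border-source BFS (queue + visited matrix) by whole-matrix label
-- propagation sweeps iterated to a fixpoint; an alternative algorithm of similar cost.


-- ===== PORT A =====
-- matrix[p.1][p.2] with 0 default for out-of-range (Python would raise there; Pre_ excludes the reachable cases)
def pvGetv (matrix : List (List Int)) (p : ℕ × ℕ) : Int := (matrix.getD p.1 []).getD p.2 0

-- visited[p.1][p.2]; default true for out-of-range (Python would raise there; Pre_ excludes the reachable cases)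
def pvVAt (vis : List (List Bool)) (p : ℕ × ℕ) : Bool := (vis.getD p.1 []).getD p.2 true

-- xs[p.1][p.2] = a
def pvSet2 {α : Type} (xs : List (List α)) (p : ℕ × ℕ) (a : α) : List (List α) :=
  xs.set p.1 ((xs.getD p.1 []).set p.2 a)

-- A's get_neighbors
def pvNb (matrix : List (List Int)) (pos : ℕ × ℕ) : List (ℕ × ℕ) :=
  (if pos.1 ≠ 0 then [(pos.1 - 1, pos.2)] else []) ++
  (if (pos.1 : Int) ≠ (matrix.length : Int) - 1 then [(pos.1 + 1, pos.2)] else []) ++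
  (if pos.2 ≠ 0 then [(pos.1, pos.2 - 1)] else []) ++
  (if (pos.2 : Int) ≠ ((matrix.getD pos.1 []).length : Int) - 1 then [(pos.1, pos.2 + 1)] else [])

-- termination measure for the while loop: number of unvisited entries
def pvCnt (vis : List (List Bool)) : ℕ := (vis.map (fun row => row.count false)).sum

-- cited by pvBfs's decreasing_by
theorem count_false_set_true (row : List Bool) (c : ℕ) (h : row.getD c true = false) :
    (row.set c true).count false < row.count false := by
  induction row generalizing c with
  | nil => simp [List.getD] at h
  | cons b t ih =>
    cases c with
    | zero =>
      simp [List.getD] at h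
      subst h
      simp
    | succ c =>
      simp [List.getD] at h
      have := ih c (by simpa [List.getD] using h)
      simp [List.set, List.count_cons]
      omega

theorem pvCnt_set2_lt (vis : List (List Bool)) (p : ℕ × ℕ) (h : pvVAt vis p = false) :
    pvCnt (pvSet2 vis p true) < pvCnt vis := by
  obtain ⟨r, c⟩ := p
  unfold pvVAt at h
  unfold pvSet2 pvCnt
  induction vis generalizing r with
  | nil => simp [List.getD] at h
  | cons row t ih =>
    cases r with
    | zero =>
      simp [List.getD] at h ⊢
      have := count_false_set_true row c (by simpa [List.getD] using h)
      omega
    | succ r =>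
      have h' : (t.getD r []).getD c true = false := by simpa [List.getD] using h
      have := ih r h'
      simp only [List.set, List.getElem?_cons_succ, List.map_cons, List.sum_cons, List.getD] at this ⊢
      omega

-- A's while loop
def pvBfs (matrix : List (List Int)) (st : List (List Int) × List (List Bool))
    (queue : List (ℕ × ℕ)) : List (List Int) × List (List Bool) :=
  match queue with
  | [] => st
  | cur :: rest =>
    if h : pvGetv matrix cur == 1 && !(pvVAt st.2 cur) then
      pvBfs matrix (pvSet2 st.1 cur 1, pvSet2 st.2 cur true)
        (rest ++ (pvNb matrix cur).filter (fun nb => !(pvGetv matrix nb == 0)))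
    else
      pvBfs matrix st rest
termination_by (pvCnt st.2, queue.length)
decreasing_by
  · exact Prod.Lex.left _ _ (pvCnt_set2_lt st.2 cur (by simp only [Bool.and_eq_true, Bool.not_eq_true'] at h; exact h.2))
  · exact Prod.Lex.right _ (Nat.lt_succ_self _)

-- the body of A's nested for loops
def pvProc (matrix : List (List Int)) (st : List (List Int) × List (List Bool)) (ri ci : ℕ) :
    List (List Int) × List (List Bool) :=
  if ((ri == 0 || (ri : Int) == (matrix.length : Int) - 1) ||
      (ci == 0 || (ci : Int) == ((matrix.getD ri []).length : Int) - 1)) &&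
     (pvGetv matrix (ri, ci) == 1) then
    pvBfs matrix (pvSet2 st.1 (ri, ci) 1, pvSet2 st.2 (ri, ci) true) (pvNb matrix (ri, ci))
  else st

def keep_border_islands (matrix : List (List Int)) : List (List Int) :=
  let res0 := matrix.map (fun row => row.map (fun _ => (0 : Int)))
  let vis0 := matrix.map (fun row => row.map (fun _ => false))
  ((List.range matrix.length).foldl
    (fun st ri => (List.range (matrix.getD ri []).length).foldl
      (fun st ci => pvProc matrix st ri ci) st)
    (res0, vis0)).1

-- ===== PORT B =====
-- Source B's `at(keep, r, c)`
def pvAt (matrix : List (List Int)) (keep : List (List Int)) (r c : Int) : Bool :=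
  decide (0 ≤ r) && decide (r < (matrix.length : Int)) &&
  decide (0 ≤ c) && decide (c < ((matrix.getD r.toNat []).length : Int)) &&
  ((keep.getD r.toNat []).getD c.toNat 0 == 1)

-- Source B's initial keep: border 1-cells
def pvKeep0 (matrix : List (List Int)) : List (List Int) :=
  matrix.mapIdx (fun r row => row.mapIdx (fun c v =>
    if v == 1 && ((r == 0 || (r : Int) == (matrix.length : Int) - 1) ||
                  (c == 0 || (c : Int) == (row.length : Int) - 1)) then (1 : Int) else 0))

-- Source B's sweep
def pvStep (matrix : List (List Int)) (keep : List (List Int)) : List (List Int) :=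
  matrix.mapIdx (fun r row => row.mapIdx (fun c v =>
    if v == 1 && ((keep.getD r []).getD c 0 == 1 ||
                  pvAt matrix keep ((r : Int) - 1) c || pvAt matrix keep ((r : Int) + 1) c ||
                  pvAt matrix keep r ((c : Int) - 1) || pvAt matrix keep r ((c : Int) + 1))
    then (1 : Int) else 0))

-- Source B's for-loop with early exit on stabilisation
def pvIterB (matrix : List (List Int)) : ℕ → List (List Int) → List (List Int)
  | 0, keep => keep
  | f + 1, keep =>
    let new := pvStep matrix keep
    if new == keep then keep else pvIterB matrix f new

def keep_border_islands_alt (matrix : List (List Int)) : List (List Int) :=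
  pvIterB matrix (matrix.map List.length).sum (pvKeep0 matrix)

-- ===== PRECONDITION & SPEC =====
-- Pre_ excludes ragged matrices in which some 1-cell's vertically adjacent row is too short to
-- contain its column: on such inputs A's BFS raises IndexError whenever it reaches that cell
-- (and where A still returns, its value happens to coincide with B's anyway).
def Pre_keep_border_islands (matrix : List (List Int)) : Prop :=
  ∀ r < matrix.length, ∀ c < (matrix.getD r []).length,
    (matrix.getD r []).getD c 0 = 1 →
      (r + 1 < matrix.length → c < (matrix.getD (r + 1) []).length) ∧
      (1 ≤ r → c < (matrix.getD (r - 1) []).length)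
instance (matrix : List (List Int)) : Decidable (Pre_keep_border_islands matrix) := by
  unfold Pre_keep_border_islands; infer_instance

def pvWitness_keep_border_islands : List (List Int) := [[1, 0], [0, 1]]

def Spec_keep_border_islands (matrix : List (List Int)) (out : List (List Int)) : Prop := out = keep_border_islands_alt matrix
instance (matrix : List (List Int)) (out : List (List Int)) : Decidable (Spec_keep_border_islands matrix out) := by unfold Spec_keep_border_islands; infer_instance

-- ===== CLAIM (what is proved, stated in full; the proofs are below) =====
def Claim_equal_keep_border_islands : Prop := ∀ (matrix : List (List Int)), Dom_keep_border_islands matrix → Pre_keep_border_islands matrix → Spec_keep_border_islands matrix (keep_border_islands matrix)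

-- ===== LEMMAS AND PROOFS =====
def kL (m : List (List Int)) (r : ℕ) : ℕ := (m.getD r []).length
def kIn (m : List (List Int)) (p : ℕ × ℕ) : Prop := p.1 < m.length ∧ p.2 < kL m p.1

-- getD of lists: out of range gives default
theorem getD_out {α : Type} {xs : List α} {i : ℕ} (d : α) (h : xs.length ≤ i) : xs.getD i d = d := by
  simp [List.getD, List.getElem?_eq_none h]

theorem getD_set_same {α : Type} (xs : List α) (i : ℕ) (a : α) (d : α) (h : i < xs.length) :
    (xs.set i a).getD i d = a := by
  simp [List.getD, List.getElem?_set_self, h]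

theorem getD_set_other {α : Type} (xs : List α) (i j : ℕ) (a : α) (d : α) (h : i ≠ j) :
    (xs.set i a).getD j d = xs.getD j d := by
  simp [List.getD, List.getElem?_set_ne h]

theorem getv_one_in {m : List (List Int)} {p : ℕ × ℕ} (h : pvGetv m p = 1) : kIn m p := by
  unfold pvGetv at h
  unfold kIn kL
  by_contra hc
  rcases Nat.lt_or_ge p.1 m.length with h1 | h1
  · have h2 : (m.getD p.1 []).length ≤ p.2 := by omega
    rw [getD_out 0 h2] at h; omega
  · rw [getD_out [] h1] at h; simp [List.getD] at h

def kShape {α : Type} (m : List (List Int)) (xs : List (List α)) : Prop :=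
  xs.length = m.length ∧ ∀ r, (xs.getD r []).length = kL m r

theorem kShape_set2 {α : Type} {m : List (List Int)} {xs : List (List α)} (h : kShape m xs)
    (p : ℕ × ℕ) (a : α) : kShape m (pvSet2 xs p a) := by
  obtain ⟨hl, hr⟩ := h
  refine ⟨by simpa [pvSet2] using hl, fun r => ?_⟩
  by_cases hre : r = p.1
  · subst hre
    by_cases hlt : p.1 < xs.length
    · rw [pvSet2, getD_set_same _ _ _ _ hlt]
      simpa using hr p.1
    · rw [pvSet2, getD_out [] (by simpa using (by omega : xs.length ≤ p.1))]
      have := hr p.1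
      rw [getD_out [] (by omega)] at this
      simpa using this
  · rw [pvSet2, getD_set_other _ _ _ _ _ (fun he => hre he.symm)]
    exact hr r

theorem kShape_map {m : List (List Int)} {α : Type} (f : Int → α) :
    kShape m (m.map (fun row => row.map f)) := by
  refine ⟨by simp, fun r => ?_⟩
  by_cases h : r < m.length
  · simp [List.getD, List.getElem?_map, List.getElem?_eq_getElem h, List.getElem?_eq_getElem (by simpa using h), kL]
  · rw [getD_out [] (by simpa using (by omega : m.length ≤ r)), kL, getD_out [] (by omega)]
    simp

-- entry of map-map at in-range position
theorem getD_map2 {m : List (List Int)} {α : Type} (f : Int → α) (d : α) (p : ℕ × ℕ)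
    (hp : kIn m p) : ((m.map (fun row => row.map f)).getD p.1 []).getD p.2 d
      = f ((m.getD p.1 []).getD p.2 0) := by
  obtain ⟨h1, h2⟩ := hp
  simp [List.getD, List.getElem?_map, List.getElem?_eq_getElem h1]
  rw [List.getElem?_eq_getElem (by simpa [kL, List.getD, List.getElem?_eq_getElem h1] using h2)]
  simp [List.getElem?_eq_getElem (by simpa [kL, List.getD, List.getElem?_eq_getElem h1] using h2 : p.2 < (m[p.1]).length)]

theorem getD2_set2_self {α : Type} (xs : List (List α)) (p : ℕ × ℕ) (d a : α)
    (h1 : p.1 < xs.length) (h2 : p.2 < (xs.getD p.1 []).length) :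
    ((pvSet2 xs p a).getD p.1 []).getD p.2 d = a := by
  rw [pvSet2, getD_set_same _ _ _ _ h1]
  rw [List.getD, List.getElem?_set_self (by simpa [List.getD] using h2)]
  rfl

theorem getD2_set2_ne {α : Type} (xs : List (List α)) (p q : ℕ × ℕ) (d a : α) (h : q ≠ p) :
    ((pvSet2 xs p a).getD q.1 []).getD q.2 d = (xs.getD q.1 []).getD q.2 d := by
  by_cases h1 : q.1 = p.1
  · have h2 : q.2 ≠ p.2 := by
      intro h2; exact h (Prod.ext h1 h2)
    by_cases h3 : p.1 < xs.length
    · rw [pvSet2, h1, getD_set_same _ _ _ _ h3]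
      exact getD_set_other _ _ _ _ _ (fun he => h2 he.symm)
    · rw [pvSet2, List.set_eq_of_length_le (by omega)]
  · rw [pvSet2, getD_set_other _ _ _ _ _ (fun he => h1 he.symm)]

def kOne (m : List (List Int)) (p : ℕ × ℕ) : Prop := kIn m p ∧ pvGetv m p = 1
def kAdj (p q : ℕ × ℕ) : Prop :=
  (p.1 = q.1 ∧ (p.2 + 1 = q.2 ∨ q.2 + 1 = p.2)) ∨ (p.2 = q.2 ∧ (p.1 + 1 = q.1 ∨ q.1 + 1 = p.1))

def kBd (m : List (List Int)) (p : ℕ × ℕ) : Prop :=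
  p.1 = 0 ∨ p.1 = m.length - 1 ∨ p.2 = 0 ∨ p.2 = kL m p.1 - 1

inductive kReach (m : List (List Int)) : ℕ × ℕ → Prop
  | base (p : ℕ × ℕ) : kOne m p → kBd m p → kReach m p
  | step (p q : ℕ × ℕ) : kReach m p → kOne m q → kAdj p q → kReach m q

theorem kReach_one {m : List (List Int)} {p : ℕ × ℕ} (h : kReach m p) : kOne m p := by
  cases h <;> assumption
theorem nb_sound {m : List (List Int)} (hpre : Pre_keep_border_islands m) {p : ℕ × ℕ}
    (hone : kOne m p) : ∀ x ∈ pvNb m p, kIn m x ∧ kAdj p x := by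
  obtain ⟨⟨hr, hc⟩, hv⟩ := hone
  obtain ⟨a, b⟩ := p
  simp only at hr hc hv
  have hpc := hpre a hr b (by exact hc) hv
  rintro ⟨x1, x2⟩ hx
  unfold pvNb at hx
  simp only [List.mem_append] at hx
  rcases hx with ((hx | hx) | hx) | hx
  · split_ifs at hx with h
    · simp [Prod.ext_iff] at hx
      obtain ⟨e1, e2⟩ := hx
      subst e1; subst e2
      refine ⟨⟨by simp; omega, ?_⟩, by unfold kAdj; simp; omega⟩
      simpa [kL] using hpc.2 (by omega)
    · simp at hx
  · split_ifs at hx with h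
    · simp [Prod.ext_iff] at hx
      obtain ⟨e1, e2⟩ := hx
      subst e1; subst e2
      have h1 : a + 1 < m.length := by simp at h ⊢; omega
      refine ⟨⟨by simpa using h1, ?_⟩, by unfold kAdj; simp⟩
      simpa [kL] using hpc.1 h1
    · simp at hx
  · split_ifs at hx with h
    · simp [Prod.ext_iff] at hx
      obtain ⟨e1, e2⟩ := hx
      subst e1; subst e2
      refine ⟨⟨by simpa using hr, by simp [kL] at hc ⊢; omega⟩, by unfold kAdj; simp; omega⟩
    · simp at hx
  · split_ifs at hx with h
    · simp [Prod.ext_iff] at hx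
      obtain ⟨e1, e2⟩ := hx
      subst e1; subst e2
      refine ⟨⟨by simpa using hr, by simp at h; simp [kL] at hc ⊢; omega⟩, by unfold kAdj; simp⟩
    · simp at hx

theorem nb_complete {m : List (List Int)} {p x : ℕ × ℕ} (hone : kOne m p) (hx : kIn m x)
    (hadj : kAdj p x) : x ∈ pvNb m p := by
  obtain ⟨⟨hr, hc⟩, _⟩ := hone
  obtain ⟨hxr, hxc⟩ := hx
  obtain ⟨a, b⟩ := p
  obtain ⟨x1, x2⟩ := x
  simp only at hr hc hxr hxc
  unfold pvNb
  simp only [List.mem_append]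
  unfold kAdj at hadj
  simp only at hadj
  unfold kL at hc hxc
  rcases hadj with ⟨h1, h2 | h2⟩ | ⟨h1, h2 | h2⟩
  · -- x = (a, b+1), right neighbor
    right
    subst h1; subst h2
    rw [if_pos (by omega : (b : Int) ≠ ((m.getD a []).length : Int) - 1)]
    simp
  · -- x = (a, b-1)
    left; right
    subst h1
    rw [if_pos (by omega : b ≠ 0)]
    simp [Prod.ext_iff]
    omega
  · -- x = (a+1, b): down
    left; left; right
    subst h1
    have : x1 < m.length := hxr
    rw [if_pos (by omega : (a : Int) ≠ (m.length : Int) - 1)]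
    simp [Prod.ext_iff]
    omega
  · -- x = (a-1, b): up
    left; left; left
    subst h1
    rw [if_pos (by omega : a ≠ 0)]
    simp [Prod.ext_iff]
    omega

theorem vAt_set2_self {m : List (List Int)} {vis : List (List Bool)} (hs : kShape m vis)
    {p : ℕ × ℕ} (hp : kIn m p) (b : Bool) : pvVAt (pvSet2 vis p b) p = b := by
  unfold pvVAt
  exact getD2_set2_self _ _ _ _ (by rw [hs.1]; exact hp.1) (by rw [hs.2 p.1]; exact hp.2)

theorem getv_set2_self {m : List (List Int)} {res : List (List Int)} (hs : kShape m res)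
    {p : ℕ × ℕ} (hp : kIn m p) (a : Int) : pvGetv (pvSet2 res p a) p = a := by
  unfold pvGetv
  exact getD2_set2_self _ _ _ _ (by rw [hs.1]; exact hp.1) (by rw [hs.2 p.1]; exact hp.2)

theorem vAt_set2_ne {vis : List (List Bool)} {p q : ℕ × ℕ} (h : q ≠ p) (b : Bool) :
    pvVAt (pvSet2 vis p b) q = pvVAt vis q := getD2_set2_ne _ _ _ _ _ h

theorem getv_set2_ne {res : List (List Int)} {p q : ℕ × ℕ} (h : q ≠ p) (a : Int) :
    pvGetv (pvSet2 res p a) q = pvGetv res q := getD2_set2_ne _ _ _ _ _ h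

theorem vAt_set2_mono {vis : List (List Bool)} {p q : ℕ × ℕ} (h : pvVAt vis q = true) :
    pvVAt (pvSet2 vis p true) q = true := by
  by_cases he : q = p
  · subst he
    by_cases h1 : q.1 < vis.length
    · by_cases h2 : q.2 < (vis.getD q.1 []).length
      · exact getD2_set2_self _ _ _ _ h1 h2
      · unfold pvVAt pvSet2
        rw [List.set_eq_of_length_le (l := vis.getD q.1 []) (by omega)]
        conv_lhs => rw [show (vis.getD q.1 []) = (vis.getD q.1 []) from rfl]
        rw [show vis.set q.1 (vis.getD q.1 []) = vis from by
          rw [List.getD_eq_getElem?_getD, List.getElem?_eq_getElem h1]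
          simp]
        exact h
    · unfold pvVAt pvSet2
      rw [List.set_eq_of_length_le (by omega)]
      exact h
  · rw [vAt_set2_ne he]; exact h

def kInv (m : List (List Int)) (st : List (List Int) × List (List Bool)) : Prop :=
  kShape m st.1 ∧ kShape m st.2 ∧
  (∀ p, kIn m p → pvGetv st.1 p = (if pvVAt st.2 p then 1 else 0)) ∧
  (∀ p, kIn m p → pvVAt st.2 p = true → kReach m p)

def kQinv (m : List (List Int)) (vis : List (List Bool)) (q : List (ℕ × ℕ)) : Prop :=
  (∀ x ∈ q, kIn m x ∧ ∃ s, kAdj s x ∧ kIn m s ∧ pvVAt vis s = true) ∧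
  (∀ p, kIn m p → pvVAt vis p = true → ∀ x, kAdj p x → kOne m x →
    (pvVAt vis x = true ∨ x ∈ q))

theorem bfs_spec {m : List (List Int)} (hpre : Pre_keep_border_islands m)
    (st : List (List Int) × List (List Bool)) (queue : List (ℕ × ℕ)) :
    kInv m st → kQinv m st.2 queue →
    kInv m (pvBfs m st queue) ∧
    (∀ p, pvVAt st.2 p = true → pvVAt (pvBfs m st queue).2 p = true) ∧
    (∀ p, kIn m p → pvVAt (pvBfs m st queue).2 p = true →
      ∀ x, kAdj p x → kOne m x → pvVAt (pvBfs m st queue).2 x = true) := by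
  induction st, queue using pvBfs.induct m with
  | case1 st =>
    intro hinv hq
    rw [pvBfs]
    exact ⟨hinv, fun p hp => hp, fun p hp hv x hadj hone =>
      (hq.2 p hp hv x hadj hone).elim id (fun hx => absurd hx (List.not_mem_nil))⟩
  | case2 st cur rest hcond ih =>
    intro hinv hq
    obtain ⟨hs1, hs2, hlink, hsound⟩ := hinv
    have hcondb := hcond
    rw [Bool.and_eq_true] at hcond
    have hv : pvGetv m cur = 1 := by
      have := hcond.1; simpa using this
    have hnv : pvVAt st.2 cur = false := by
      have := hcond.2; simpa using this
    have hcur_in : kIn m cur := getv_one_in hv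
    have hone : kOne m cur := ⟨hcur_in, hv⟩
    have hreach : kReach m cur := by
      obtain ⟨-, s, hadj, hsin, hsvis⟩ := hq.1 cur (List.mem_cons_self)
      exact kReach.step s cur (hsound s hsin hsvis) hone hadj
    have hvself : pvVAt (pvSet2 st.2 cur true) cur = true := vAt_set2_self hs2 hcur_in true
    have hinv1 : kInv m (pvSet2 st.1 cur 1, pvSet2 st.2 cur true) := by
      refine ⟨kShape_set2 hs1 _ _, kShape_set2 hs2 _ _, ?_, ?_⟩
      · intro p hp
        by_cases he : p = cur
        · subst he
          simp only
          rw [getv_set2_self hs1 hp, hvself]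
          simp
        · simp only
          rw [getv_set2_ne he, vAt_set2_ne he]
          exact hlink p hp
      · intro p hp hvp
        by_cases he : p = cur
        · subst he; exact hreach
        · simp only at hvp
          rw [vAt_set2_ne he] at hvp
          exact hsound p hp hvp
    have hq1 : kQinv m (pvSet2 st.2 cur true)
        (rest ++ List.filter (fun nb => !pvGetv m nb == 0) (pvNb m cur)) := by
      constructor
      · intro x hx
        rcases List.mem_append.mp hx with hx | hx
        · obtain ⟨hxin, s, hadj, hsin, hsvis⟩ := hq.1 x (List.mem_cons_of_mem _ hx)
          exact ⟨hxin, s, hadj, hsin, vAt_set2_mono hsvis⟩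
        · have hxnb := List.mem_of_mem_filter hx
          obtain ⟨hxin, hadj⟩ := nb_sound hpre hone x hxnb
          exact ⟨hxin, cur, hadj, hcur_in, hvself⟩
      · intro p hp hvp x hadj hxone
        by_cases he : p = cur
        · subst he
          right
          refine List.mem_append.mpr (Or.inr (List.mem_filter.mpr
            ⟨nb_complete hone hxone.1 hadj, ?_⟩))
          simp [hxone.2]
        · rw [vAt_set2_ne he] at hvp
          rcases hq.2 p hp hvp x hadj hxone with hvx | hx
          · exact Or.inl (vAt_set2_mono hvx)
          · rcases List.mem_cons.mp hx with he2 | he2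
            · subst he2; exact Or.inl hvself
            · exact Or.inr (List.mem_append.mpr (Or.inl he2))
    obtain ⟨c1, c2, c3⟩ := ih hinv1 hq1
    rw [pvBfs, dif_pos hcondb]
    exact ⟨c1, fun p hp => c2 p (vAt_set2_mono hp), c3⟩
  | case3 st cur rest hcond ih =>
    intro hinv hq
    have hcond' : pvGetv m cur ≠ 1 ∨ pvVAt st.2 cur = true := by
      by_contra hc
      push_neg at hc
      exact hcond (by simp [hc.1, hc.2])
    have hq1 : kQinv m st.2 rest := by
      refine ⟨fun x hx => hq.1 x (List.mem_cons_of_mem _ hx), ?_⟩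
      intro p hp hvp x hadj hxone
      rcases hq.2 p hp hvp x hadj hxone with hvx | hx
      · exact Or.inl hvx
      · rcases List.mem_cons.mp hx with he | he
        · subst he
          rcases hcond' with hne | hvt
          · exact absurd hxone.2 hne
          · exact Or.inl hvt
        · exact Or.inr he
    rw [pvBfs, dif_neg hcond]
    exact ih hinv hq1

def kDone (m : List (List Int)) (vis : List (List Bool)) : Prop :=
  ∀ p, kIn m p → pvVAt vis p = true → ∀ x, kAdj p x → kOne m x → pvVAt vis x = true

theorem border_bridge {m : List (List Int)} {ri ci : ℕ} (hin : kIn m (ri, ci)) :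
    (((ri == 0 || (ri : Int) == (m.length : Int) - 1) ||
      (ci == 0 || (ci : Int) == ((m.getD ri []).length : Int) - 1)) = true) ↔ kBd m (ri, ci) := by
  obtain ⟨h1, h2⟩ := hin
  simp only at h1 h2
  unfold kBd kL at *
  simp only [Bool.or_eq_true, beq_iff_eq]
  constructor
  · intro h; omega
  · intro h; omega

theorem proc_spec {m : List (List Int)} (hpre : Pre_keep_border_islands m)
    (st : List (List Int) × List (List Bool)) (ri ci : ℕ)
    (hinv : kInv m st) (hdone : kDone m st.2) :
    kInv m (pvProc m st ri ci) ∧ kDone m (pvProc m st ri ci).2 ∧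
    (∀ p, pvVAt st.2 p = true → pvVAt (pvProc m st ri ci).2 p = true) ∧
    ((kOne m (ri, ci) ∧ kBd m (ri, ci)) → pvVAt (pvProc m st ri ci).2 (ri, ci) = true) := by
  obtain ⟨hs1, hs2, hlink, hsound⟩ := hinv
  unfold pvProc
  by_cases hc : (((ri == 0 || (ri : Int) == (m.length : Int) - 1) ||
      (ci == 0 || (ci : Int) == ((m.getD ri []).length : Int) - 1)) &&
      (pvGetv m (ri, ci) == 1)) = true
  · rw [if_pos hc]
    rw [Bool.and_eq_true] at hc
    have hv : pvGetv m (ri, ci) = 1 := by simpa using hc.2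
    have hin : kIn m (ri, ci) := getv_one_in hv
    have hone : kOne m (ri, ci) := ⟨hin, hv⟩
    have hbd : kBd m (ri, ci) := (border_bridge hin).mp hc.1
    have hreach : kReach m (ri, ci) := kReach.base _ hone hbd
    have hvself : pvVAt (pvSet2 st.2 (ri, ci) true) (ri, ci) = true := vAt_set2_self hs2 hin true
    have hinv1 : kInv m (pvSet2 st.1 (ri, ci) 1, pvSet2 st.2 (ri, ci) true) := by
      refine ⟨kShape_set2 hs1 _ _, kShape_set2 hs2 _ _, ?_, ?_⟩
      · intro p hp
        by_cases he : p = (ri, ci)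
        · subst he
          simp only
          rw [getv_set2_self hs1 hp, hvself]
          simp
        · simp only
          rw [getv_set2_ne he, vAt_set2_ne he]
          exact hlink p hp
      · intro p hp hvp
        by_cases he : p = (ri, ci)
        · subst he; exact hreach
        · simp only at hvp
          rw [vAt_set2_ne he] at hvp
          exact hsound p hp hvp
    have hq1 : kQinv m (pvSet2 st.2 (ri, ci) true) (pvNb m (ri, ci)) := by
      constructor
      · intro x hx
        obtain ⟨hxin, hadj⟩ := nb_sound hpre hone x hx
        exact ⟨hxin, (ri, ci), hadj, hin, hvself⟩
      · intro p hp hvp x hadj hxone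
        by_cases he : p = (ri, ci)
        · subst he
          exact Or.inr (nb_complete hone hxone.1 hadj)
        · rw [vAt_set2_ne he] at hvp
          exact Or.inl (vAt_set2_mono (hdone p hp hvp x hadj hxone))
    obtain ⟨c1, c2, c3⟩ := bfs_spec hpre _ _ hinv1 hq1
    exact ⟨c1, c3, fun p hp => c2 p (vAt_set2_mono hp), fun _ => c2 _ hvself⟩
  · rw [if_neg hc]
    refine ⟨⟨hs1, hs2, hlink, hsound⟩, hdone, fun p hp => hp, ?_⟩
    intro ⟨hone, hbd⟩
    exact absurd (by
      rw [Bool.and_eq_true]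
      exact ⟨(border_bridge hone.1).mpr hbd, by simpa using hone.2⟩) hc

theorem foldl_inner_spec {m : List (List Int)} (hpre : Pre_keep_border_islands m) (ri : ℕ) :
    ∀ (l : List ℕ) (st : List (List Int) × List (List Bool)), kInv m st → kDone m st.2 →
    kInv m (l.foldl (fun st ci => pvProc m st ri ci) st) ∧
    kDone m (l.foldl (fun st ci => pvProc m st ri ci) st).2 ∧
    (∀ p, pvVAt st.2 p = true → pvVAt (l.foldl (fun st ci => pvProc m st ri ci) st).2 p = true) ∧
    (∀ ci ∈ l, kOne m (ri, ci) ∧ kBd m (ri, ci) →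
      pvVAt (l.foldl (fun st ci => pvProc m st ri ci) st).2 (ri, ci) = true) := by
  intro l
  induction l with
  | nil => exact fun st h1 h2 => ⟨h1, h2, fun p hp => hp, by simp⟩
  | cons c t ih =>
    intro st h1 h2
    obtain ⟨i1, d1, m1, e1⟩ := proc_spec hpre st ri c h1 h2
    obtain ⟨i2, d2, m2, e2⟩ := ih (pvProc m st ri c) i1 d1
    simp only [List.foldl_cons]
    refine ⟨i2, d2, fun p hp => m2 p (m1 p hp), ?_⟩
    intro ci hci hoc
    rcases List.mem_cons.mp hci with he | he
    · subst he
      exact m2 _ (e1 hoc)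
    · exact e2 ci he hoc

theorem foldl_outer_spec {m : List (List Int)} (hpre : Pre_keep_border_islands m) :
    ∀ (l : List ℕ) (st : List (List Int) × List (List Bool)), kInv m st → kDone m st.2 →
    kInv m (l.foldl (fun st ri => (List.range (m.getD ri []).length).foldl
      (fun st ci => pvProc m st ri ci) st) st) ∧
    kDone m (l.foldl (fun st ri => (List.range (m.getD ri []).length).foldl
      (fun st ci => pvProc m st ri ci) st) st).2 ∧
    (∀ p, pvVAt st.2 p = true → pvVAt (l.foldl (fun st ri => (List.range (m.getD ri []).length).foldl
      (fun st ci => pvProc m st ri ci) st) st).2 p = true) ∧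
    (∀ ri ∈ l, ∀ ci < kL m ri, kOne m (ri, ci) ∧ kBd m (ri, ci) →
      pvVAt (l.foldl (fun st ri => (List.range (m.getD ri []).length).foldl
        (fun st ci => pvProc m st ri ci) st) st).2 (ri, ci) = true) := by
  intro l
  induction l with
  | nil => exact fun st h1 h2 => ⟨h1, h2, fun p hp => hp, by simp⟩
  | cons r t ih =>
    intro st h1 h2
    obtain ⟨i1, d1, m1, e1⟩ := foldl_inner_spec hpre r (List.range (m.getD r []).length) st h1 h2
    obtain ⟨i2, d2, m2, e2⟩ := ih _ i1 d1
    simp only [List.foldl_cons]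
    refine ⟨i2, d2, fun p hp => m2 p (m1 p hp), ?_⟩
    intro ri hri ci hci hoc
    rcases List.mem_cons.mp hri with he | he
    · subst he
      exact m2 _ (e1 ci (List.mem_range.mpr (by simpa [kL] using hci)) hoc)
    · exact e2 ri he ci hci hoc

-- the state computed by A's nested loops
def kAState (m : List (List Int)) : List (List Int) × List (List Bool) :=
  (List.range m.length).foldl
    (fun st ri => (List.range (m.getD ri []).length).foldl
      (fun st ci => pvProc m st ri ci) st)
    (m.map (fun row => row.map (fun _ => (0 : Int))), m.map (fun row => row.map (fun _ => false)))

theorem kAState_spec {m : List (List Int)} (hpre : Pre_keep_border_islands m) :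
    kInv m (kAState m) ∧ (∀ p, kIn m p → (pvVAt (kAState m).2 p = true ↔ kReach m p)) := by
  have h0 : kInv m (m.map (fun row => row.map (fun _ => (0 : Int))),
      m.map (fun row => row.map (fun _ => false))) := by
    refine ⟨kShape_map _, kShape_map _, ?_, ?_⟩
    · intro p hp
      have hv0 : pvVAt (m.map (fun row => row.map (fun _ => false))) p = false := by
        simp only [pvVAt]; rw [getD_map2 _ _ _ hp]
      have hg0 : pvGetv (m.map (fun row => row.map (fun _ => (0 : Int)))) p = 0 := by
        simp only [pvGetv]; rw [getD_map2 _ _ _ hp]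
      simp only at hv0 hg0 ⊢
      rw [hv0, hg0]
      simp
    · intro p hp hv
      simp only [pvVAt] at hv
      rw [getD_map2 _ _ _ hp] at hv
      simp at hv
  have hd0 : kDone m (m.map (fun row => row.map (fun _ => false))) := by
    intro p hp hv
    simp only [pvVAt] at hv
    rw [getD_map2 _ _ _ hp] at hv
    simp at hv
  obtain ⟨hi, hd, hmono, heff⟩ := foldl_outer_spec hpre (List.range m.length) _ h0 hd0
  refine ⟨hi, fun p hp => ⟨fun hv => hi.2.2.2 p hp hv, fun hr => ?_⟩⟩
  induction hr with
  | base q hone hbd =>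
    have := heff q.1 (List.mem_range.mpr hone.1.1) q.2 hone.1.2
      (by rw [Prod.mk.eta]; exact ⟨hone, hbd⟩)
    rw [Prod.mk.eta] at this
    exact this
  | step q x hq hone hadj ihq =>
    exact hd q (kReach_one hq).1 (ihq (kReach_one hq).1) x hadj hone

-- ===== B side =====
def kIter (m : List (List Int)) : ℕ → List (List Int)
  | 0 => pvKeep0 m
  | k + 1 => pvStep m (kIter m k)

theorem getD_mapIdx_lt {α β : Type} (xs : List α) (F : ℕ → α → β) (i : ℕ) (h : i < xs.length)
    (d : β) : (xs.mapIdx F).getD i d = F i xs[i] := by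
  simp [List.getD, List.getElem?_mapIdx, List.getElem?_eq_getElem h]

theorem kShape_mapIdx {m : List (List Int)} (F : ℕ → List Int → List Int)
    (hF : ∀ r row, (F r row).length = row.length) : kShape m (m.mapIdx F) := by
  refine ⟨by simp, fun r => ?_⟩
  by_cases h : r < m.length
  · rw [getD_mapIdx_lt _ _ _ h, hF]
    simp [kL, List.getD, List.getElem?_eq_getElem h]
  · rw [getD_out [] (by simpa using (by omega : m.length ≤ r)), kL,
      getD_out [] (by omega)]

theorem kShape_keep0 (m : List (List Int)) : kShape m (pvKeep0 m) :=
  kShape_mapIdx _ (fun r row => by simp [List.length_mapIdx])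

theorem kShape_step (m : List (List Int)) (keep : List (List Int)) :
    kShape m (pvStep m keep) :=
  kShape_mapIdx _ (fun r row => by simp [List.length_mapIdx])

theorem kShape_kIter (m : List (List Int)) (k : ℕ) : kShape m (kIter m k) := by
  cases k with
  | zero => exact kShape_keep0 m
  | succ k => exact kShape_step m _

theorem mapIdx2_entry {m : List (List Int)} (G : ℕ → List Int → ℕ → Int → Int) {p : ℕ × ℕ}
    (hp : kIn m p) :
    pvGetv (m.mapIdx (fun r row => row.mapIdx (fun c v => G r row c v))) p
      = G p.1 (m.getD p.1 []) p.2 (pvGetv m p) := by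
  obtain ⟨h1, h2⟩ := hp
  unfold pvGetv
  rw [getD_mapIdx_lt _ _ _ h1]
  have h2' : p.2 < (m[p.1]).length := by
    simpa [kL, List.getD, List.getElem?_eq_getElem h1] using h2
  rw [getD_mapIdx_lt _ _ _ h2']
  simp [List.getD, List.getElem?_eq_getElem h1, List.getElem?_eq_getElem h2']

theorem keep0_entry {m : List (List Int)} {p : ℕ × ℕ} (hp : kIn m p) :
    pvGetv (pvKeep0 m) p =
      if (pvGetv m p == 1 && ((p.1 == 0 || (p.1 : Int) == (m.length : Int) - 1) ||
        (p.2 == 0 || (p.2 : Int) == (kL m p.1 : Int) - 1))) then 1 else 0 := by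
  rw [pvKeep0, mapIdx2_entry _ hp]
  rfl

theorem step_entry {m : List (List Int)} (keep : List (List Int)) {p : ℕ × ℕ} (hp : kIn m p) :
    pvGetv (pvStep m keep) p =
      if (pvGetv m p == 1 && (pvGetv keep p == 1 ||
        pvAt m keep ((p.1 : Int) - 1) p.2 || pvAt m keep ((p.1 : Int) + 1) p.2 ||
        pvAt m keep p.1 ((p.2 : Int) - 1) || pvAt m keep p.1 ((p.2 : Int) + 1))) then 1 else 0 := by
  rw [pvStep, mapIdx2_entry _ hp]
  rfl

def kP (m : List (List Int)) (k : ℕ) (p : ℕ × ℕ) : Prop := pvGetv (kIter m k) p = 1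

theorem getv_one_in_of_shape {m : List (List Int)} {xs : List (List Int)} (hs : kShape m xs)
    {p : ℕ × ℕ} (h : pvGetv xs p = 1) : kIn m p := by
  unfold pvGetv at h
  unfold kIn
  by_contra hc
  rcases Nat.lt_or_ge p.1 xs.length with h1 | h1
  · have h2 : (xs.getD p.1 []).length ≤ p.2 := by
      rw [hs.2 p.1]
      rw [hs.1] at h1
      omega
    rw [getD_out 0 h2] at h; omega
  · rw [getD_out [] h1] at h
    simp [List.getD] at h

theorem kP_in {m : List (List Int)} {k : ℕ} {p : ℕ × ℕ} (h : kP m k p) : kIn m p :=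
  getv_one_in_of_shape (kShape_kIter m k) h

theorem kP_one {m : List (List Int)} {k : ℕ} {p : ℕ × ℕ} (h : kP m k p) : kOne m p := by
  have hin := kP_in h
  refine ⟨hin, ?_⟩
  unfold kP at h
  cases k with
  | zero =>
    rw [kIter, keep0_entry hin] at h
    split_ifs at h with hc
    · rw [Bool.and_eq_true] at hc
      exact by simpa using hc.1
    · omega
  | succ k =>
    rw [kIter, step_entry _ hin] at h
    split_ifs at h with hc
    · rw [Bool.and_eq_true] at hc
      exact by simpa using hc.1
    · omega

theorem pvAt_true_iff {m keep : List (List Int)} (r c : Int) :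
    pvAt m keep r c = true ↔
      0 ≤ r ∧ r < (m.length : Int) ∧ 0 ≤ c ∧ c < ((m.getD r.toNat []).length : Int) ∧
      pvGetv keep (r.toNat, c.toNat) = 1 := by
  unfold pvAt pvGetv
  simp [Bool.and_eq_true, decide_eq_true_iff, and_assoc]

theorem nbB_iff {m keep : List (List Int)} {p : ℕ × ℕ} (hp : kIn m p) :
    ((pvAt m keep ((p.1 : Int) - 1) p.2 || pvAt m keep ((p.1 : Int) + 1) p.2 ||
      pvAt m keep p.1 ((p.2 : Int) - 1) || pvAt m keep p.1 ((p.2 : Int) + 1)) = true)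
    ↔ ∃ s, kAdj s p ∧ kIn m s ∧ pvGetv keep s = 1 := by
  obtain ⟨hp1, hp2⟩ := hp
  simp only [kL] at hp2
  constructor
  · intro h
    simp only [Bool.or_eq_true] at h
    rcases h with ((h | h) | h) | h
    · rw [pvAt_true_iff] at h
      obtain ⟨h1, h2, h3, h4, h5⟩ := h
      have e1 : ((p.1 : Int) - 1).toNat = p.1 - 1 := by omega
      have e2 : ((p.2 : ℕ) : Int).toNat = p.2 := by omega
      rw [e1] at h5 h4
      rw [e2] at h5
      refine ⟨(p.1 - 1, p.2), Or.inr ⟨rfl, Or.inl (by omega)⟩, ⟨?_, ?_⟩, h5⟩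
      · show p.1 - 1 < m.length
        omega
      · show p.2 < kL m (p.1 - 1, p.2).1
        simp only [kL]
        omega
    · rw [pvAt_true_iff] at h
      obtain ⟨h1, h2, h3, h4, h5⟩ := h
      have e1 : ((p.1 : Int) + 1).toNat = p.1 + 1 := by omega
      have e2 : ((p.2 : ℕ) : Int).toNat = p.2 := by omega
      rw [e1] at h5 h4
      rw [e2] at h5
      refine ⟨(p.1 + 1, p.2), Or.inr ⟨rfl, Or.inr (by omega)⟩, ⟨?_, ?_⟩, h5⟩
      · show p.1 + 1 < m.length
        omega
      · show p.2 < kL m (p.1 + 1, p.2).1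
        simp only [kL]
        omega
    · rw [pvAt_true_iff] at h
      obtain ⟨h1, h2, h3, h4, h5⟩ := h
      have e1 : ((p.1 : ℕ) : Int).toNat = p.1 := by omega
      have e2 : ((p.2 : Int) - 1).toNat = p.2 - 1 := by omega
      rw [e1] at h5 h4
      rw [e2] at h5
      refine ⟨(p.1, p.2 - 1), Or.inl ⟨rfl, Or.inl (by omega)⟩, ⟨?_, ?_⟩, h5⟩
      · show p.1 < m.length
        omega
      · show p.2 - 1 < kL m (p.1, p.2 - 1).1
        simp only [kL]
        omega
    · rw [pvAt_true_iff] at h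
      obtain ⟨h1, h2, h3, h4, h5⟩ := h
      have e1 : ((p.1 : ℕ) : Int).toNat = p.1 := by omega
      have e2 : ((p.2 : Int) + 1).toNat = p.2 + 1 := by omega
      rw [e1] at h5 h4
      rw [e2] at h5
      refine ⟨(p.1, p.2 + 1), Or.inl ⟨rfl, Or.inr (by omega)⟩, ⟨?_, ?_⟩, h5⟩
      · show p.1 < m.length
        omega
      · show p.2 + 1 < kL m (p.1, p.2 + 1).1
        simp only [kL]
        omega
  · rintro ⟨⟨s1, s2⟩, hadj, ⟨hs1, hs2⟩, hv⟩
    simp only [Bool.or_eq_true]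
    simp only [kL] at hs2
    simp only at hs1 hs2 hv
    unfold kAdj at hadj
    simp only at hadj
    rcases hadj with ⟨h1, h2 | h2⟩ | ⟨h1, h2 | h2⟩
    · -- s2 + 1 = p.2 : s is left neighbor
      left; right
      subst h1
      have e1 : ((p.1 : ℕ) : Int).toNat = p.1 := by omega
      have e2 : ((p.2 : Int) - 1).toNat = s2 := by omega
      rw [pvAt_true_iff, e1, e2]
      exact ⟨by omega, by omega, by omega, by omega, hv⟩
    · -- p.2 + 1 = s2 : right neighbor
      right
      subst h1
      have e1 : ((p.1 : ℕ) : Int).toNat = p.1 := by omega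
      have e2 : ((p.2 : Int) + 1).toNat = s2 := by omega
      rw [pvAt_true_iff, e1, e2]
      exact ⟨by omega, by omega, by omega, by omega, hv⟩
    · -- s1 + 1 = p.1 : up neighbor
      left; left; left
      subst h1
      have e1 : ((p.2 : ℕ) : Int).toNat = p.2 := by omega
      have e2 : ((p.1 : Int) - 1).toNat = s1 := by omega
      rw [pvAt_true_iff, e2, e1]
      exact ⟨by omega, by omega, by omega, by omega, hv⟩
    · -- p.1 + 1 = s1 : down neighbor
      left; left; right
      subst h1
      have e1 : ((p.2 : ℕ) : Int).toNat = p.2 := by omega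
      have e2 : ((p.1 : Int) + 1).toNat = s1 := by omega
      rw [pvAt_true_iff, e2, e1]
      exact ⟨by omega, by omega, by omega, by omega, hv⟩

theorem kP_char {m : List (List Int)} {k : ℕ} {p : ℕ × ℕ} (hp : kIn m p) :
    kP m (k + 1) p ↔ pvGetv m p = 1 ∧ (kP m k p ∨ ∃ s, kAdj s p ∧ kIn m s ∧ kP m k s) := by
  unfold kP
  rw [kIter, step_entry _ hp]
  constructor
  · intro h
    split_ifs at h with hc
    · rw [Bool.and_eq_true] at hc
      refine ⟨by simpa using hc.1, ?_⟩
      have := hc.2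
      simp only [Bool.or_eq_true] at this
      rcases this with (((hv | hnb) | hnb) | hnb) | hnb
      · exact Or.inl (by simpa using hv)
      · exact Or.inr ((nbB_iff hp).mp (by simp [hnb]))
      · exact Or.inr ((nbB_iff hp).mp (by simp [hnb]))
      · exact Or.inr ((nbB_iff hp).mp (by simp [hnb]))
      · exact Or.inr ((nbB_iff hp).mp (by simp [hnb]))
    · omega
  · intro ⟨h1, h2⟩
    rw [if_pos]
    rw [Bool.and_eq_true]
    refine ⟨by simpa using h1, ?_⟩
    rcases h2 with hv | ⟨s, hadj, hin, hv⟩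
    · simp [hv]
    · have := (nbB_iff hp).mpr ⟨s, hadj, hin, hv⟩
      simp only [Bool.or_eq_true] at this
      rcases this with ((ha | hb) | hc) | hd
      · simp [ha]
      · simp [hb]
      · simp [hc]
      · simp [hd]

theorem kBd_bridge {m : List (List Int)} {p : ℕ × ℕ} (hp : kIn m p) :
    (((p.1 == 0 || (p.1 : Int) == (m.length : Int) - 1) ||
      (p.2 == 0 || (p.2 : Int) == (kL m p.1 : Int) - 1)) = true) ↔ kBd m p := by
  obtain ⟨h1, h2⟩ := hp
  unfold kBd
  simp only [Bool.or_eq_true, beq_iff_eq]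
  constructor
  · intro h; omega
  · intro h; omega

theorem kP_zero_iff {m : List (List Int)} {p : ℕ × ℕ} (hp : kIn m p) :
    kP m 0 p ↔ pvGetv m p = 1 ∧ kBd m p := by
  unfold kP
  rw [kIter, keep0_entry hp]
  constructor
  · intro h
    split_ifs at h with hc
    · rw [Bool.and_eq_true] at hc
      exact ⟨by simpa using hc.1, (kBd_bridge ⟨hp.1, hp.2⟩).mp hc.2⟩
    · omega
  · intro ⟨h1, h2⟩
    rw [if_pos]
    rw [Bool.and_eq_true]
    exact ⟨by simpa using h1, (kBd_bridge ⟨hp.1, hp.2⟩).mpr h2⟩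

theorem kP_mono {m : List (List Int)} (k : ℕ) {p : ℕ × ℕ} (h : kP m k p) : kP m (k + 1) p := by
  have hin := kP_in h
  have hone := kP_one h
  exact (kP_char hin).mpr ⟨hone.2, Or.inl h⟩

theorem kP_mono_le {m : List (List Int)} {j k : ℕ} (hjk : j ≤ k) {p : ℕ × ℕ} (h : kP m j p) :
    kP m k p := by
  induction k with
  | zero => simpa [Nat.le_zero.mp hjk] using h
  | succ k ih =>
    rcases Nat.lt_or_ge j (k + 1) with hl | hl
    · exact kP_mono k (ih (by omega))
    · have : j = k + 1 := by omega
      simpa [this] using h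

theorem kP_det {m : List (List Int)} {j k : ℕ} (h : ∀ q, kP m j q ↔ kP m k q) (p : ℕ × ℕ) :
    kP m (j + 1) p ↔ kP m (k + 1) p := by
  by_cases hp : kIn m p
  · rw [kP_char hp, kP_char hp]
    constructor
    · rintro ⟨h1, h2 | ⟨s, hadj, hin, hv⟩⟩
      · exact ⟨h1, Or.inl ((h p).mp h2)⟩
      · exact ⟨h1, Or.inr ⟨s, hadj, hin, (h s).mp hv⟩⟩
    · rintro ⟨h1, h2 | ⟨s, hadj, hin, hv⟩⟩
      · exact ⟨h1, Or.inl ((h p).mpr h2)⟩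
      · exact ⟨h1, Or.inr ⟨s, hadj, hin, (h s).mpr hv⟩⟩
  · constructor
    · intro hq; exact absurd (kP_in hq) hp
    · intro hq; exact absurd (kP_in hq) hp

theorem kP_stable_from {m : List (List Int)} {j : ℕ} (h : ∀ q, kP m j q ↔ kP m (j + 1) q) :
    ∀ i, j ≤ i → ∀ q, kP m i q ↔ kP m j q := by
  intro i
  induction i with
  | zero => intro hi q; rw [Nat.le_zero.mp hi]
  | succ i ih =>
    intro hi q
    rcases Nat.lt_or_ge j (i + 1) with hl | hl
    · have hij : j ≤ i := by omega
      have hstep := kP_det (fun q => (ih hij q)) q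
      rw [hstep]
      exact ((h q).symm)
    · have : j = i + 1 := by omega
      rw [this]


def kCells (m : List (List Int)) : Finset (ℕ × ℕ) :=
  (Finset.range m.length).biUnion (fun r => (Finset.range (kL m r)).image (fun c => (r, c)))

theorem mem_kCells {m : List (List Int)} {p : ℕ × ℕ} : p ∈ kCells m ↔ kIn m p := by
  unfold kCells kIn
  simp only [Finset.mem_biUnion, Finset.mem_range, Finset.mem_image]
  constructor
  · rintro ⟨r, hr, c, hc, rfl⟩
    exact ⟨hr, hc⟩
  · rintro ⟨h1, h2⟩
    exact ⟨p.1, h1, p.2, h2, rfl⟩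

theorem sum_kL (m : List (List Int)) :
    ∑ r ∈ Finset.range m.length, kL m r = (m.map List.length).sum := by
  induction m with
  | nil => simp
  | cons row t ih =>
    rw [List.map_cons, List.sum_cons, List.length_cons, Finset.sum_range_succ']
    have e : ∀ i, kL (row :: t) (i + 1) = kL t i := fun i => by simp [kL]
    have e0 : kL (row :: t) 0 = row.length := by simp [kL]
    simp only [e, e0]
    rw [ih, Nat.add_comm]

theorem card_kCells_le {m : List (List Int)} : (kCells m).card ≤ (m.map List.length).sum := by
  have h1 : (kCells m).card ≤ ∑ r ∈ Finset.range m.length, kL m r := by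
    refine le_trans (Finset.card_biUnion_le) ?_
    refine Finset.sum_le_sum (fun r _ => ?_)
    exact le_trans (Finset.card_image_le) (by simp)
  exact le_trans h1 (le_of_eq (sum_kL m))

def kSF (m : List (List Int)) (k : ℕ) : Finset (ℕ × ℕ) :=
  (kCells m).filter (fun p => pvGetv (kIter m k) p = 1)

theorem mem_kSF {m : List (List Int)} {k : ℕ} {p : ℕ × ℕ} : p ∈ kSF m k ↔ kP m k p := by
  unfold kSF
  rw [Finset.mem_filter, mem_kCells]
  constructor
  · exact fun h => h.2
  · exact fun h => ⟨kP_in h, h⟩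

theorem kP_stab {m : List (List Int)} :
    ∀ q, kP m ((m.map List.length).sum) q ↔ kP m ((m.map List.length).sum + 1) q := by
  have aux : ∀ k : ℕ, (∃ j ≤ k, ∀ q, kP m j q ↔ kP m (j + 1) q) ∨ k ≤ (kSF m k).card := by
    intro k
    induction k with
    | zero => exact Or.inr (Nat.zero_le _)
    | succ k ih =>
      rcases ih with ⟨j, hj, hstable⟩ | hcard
      · exact Or.inl ⟨j, by omega, hstable⟩
      · by_cases heq : ∀ q, kP m k q ↔ kP m (k + 1) q
        · exact Or.inl ⟨k, by omega, heq⟩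
        · push_neg at heq
          obtain ⟨q, hq⟩ := heq
          have hq2 : ¬ kP m k q ∧ kP m (k + 1) q := by
            rcases hq with ⟨hk, hk1⟩ | hok
            · exact absurd (kP_mono k hk) hk1
            · exact hok
          obtain ⟨h1, h2⟩ := hq2
          have hss : kSF m k ⊂ kSF m (k + 1) := by
            constructor
            · intro x hx
              exact mem_kSF.mpr (kP_mono k (mem_kSF.mp hx))
            · intro hsub
              exact h1 (mem_kSF.mp (hsub (mem_kSF.mpr h2)))
          have := Finset.card_lt_card hss
          exact Or.inr (by omega)
  rcases aux ((m.map List.length).sum) with ⟨j, hj, hstable⟩ | hcard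
  · intro q
    have h1 := kP_stable_from hstable ((m.map List.length).sum) hj q
    have h2 := kP_stable_from hstable ((m.map List.length).sum + 1) (by omega) q
    rw [h1, h2]
  · have hsub : kSF m ((m.map List.length).sum) ⊆ kCells m := Finset.filter_subset _ _
    have hcells : (kSF m ((m.map List.length).sum)).card = (kCells m).card := by
      have := card_kCells_le (m := m)
      have h2 := Finset.card_le_card hsub
      omega
    have heq : kSF m ((m.map List.length).sum) = kCells m :=
      Finset.eq_of_subset_of_card_le hsub (le_of_eq hcells.symm)
    intro q
    constructor
    · exact fun h => kP_mono _ h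
    · intro h
      have hin : q ∈ kCells m := mem_kCells.mpr (kP_in h)
      rw [← heq] at hin
      exact mem_kSF.mp hin

theorem kP_reach {m : List (List Int)} (k : ℕ) : ∀ {p : ℕ × ℕ}, kP m k p → kReach m p := by
  induction k with
  | zero =>
    intro p h
    have hin := kP_in h
    obtain ⟨h1, h2⟩ := (kP_zero_iff hin).mp h
    exact kReach.base p ⟨hin, h1⟩ h2
  | succ k ih =>
    intro p h
    have hin := kP_in h
    obtain ⟨h1, h2⟩ := (kP_char hin).mp h
    rcases h2 with h2 | ⟨s, hadj, hsin, hs⟩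
    · exact ih h2
    · exact kReach.step s p (ih hs) ⟨hin, h1⟩ hadj

theorem reach_kP_fix {m : List (List Int)} {k : ℕ} (hfix : ∀ q, kP m (k + 1) q ↔ kP m k q)
    {p : ℕ × ℕ} (h : kReach m p) : kP m k p := by
  induction h with
  | base q hone hbd =>
    exact kP_mono_le (Nat.zero_le k) ((kP_zero_iff hone.1).mpr ⟨hone.2, hbd⟩)
  | step s q hs hone hadj ih =>
    refine (hfix q).mp ((kP_char hone.1).mpr ⟨hone.2, Or.inr ⟨s, hadj, (kReach_one hs).1, ih⟩⟩)

theorem iterB_reached (m : List (List Int)) :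
    ∀ (f k0 : ℕ), ∃ j ≤ f, pvIterB m f (kIter m k0) = kIter m (k0 + j) ∧
      (pvStep m (kIter m (k0 + j)) = kIter m (k0 + j) ∨ j = f) := by
  intro f
  induction f with
  | zero => exact fun k0 => ⟨0, le_refl 0, by simp [pvIterB], Or.inr rfl⟩
  | succ f ih =>
    intro k0
    by_cases hc : (pvStep m (kIter m k0) == kIter m k0) = true
    · refine ⟨0, Nat.zero_le _, ?_, Or.inl (by simpa using hc)⟩
      rw [pvIterB]
      simp only [hc, if_true]
      simp
    · obtain ⟨j, hj, heq, hst⟩ := ih (k0 + 1)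
      refine ⟨j + 1, by omega, ?_, ?_⟩
      · rw [pvIterB]
        simp only [hc, if_false]
        have h2 : pvStep m (kIter m k0) = kIter m (k0 + 1) := rfl
        have e : k0 + 1 + j = k0 + (j + 1) := by omega
        rw [h2, heq, e]
        simp
      · rcases hst with hst | hst
        · refine Or.inl ?_
          have e : k0 + 1 + j = k0 + (j + 1) := by omega
          rw [← e]
          exact hst
        · exact Or.inr (by omega)

theorem alt_char (m : List (List Int)) :
    ∃ k, keep_border_islands_alt m = kIter m k ∧ (∀ q, kP m (k + 1) q ↔ kP m k q) := by
  obtain ⟨j, hj, heq, hst⟩ := iterB_reached m ((m.map List.length).sum) 0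
  refine ⟨j, by simpa using heq, ?_⟩
  rcases hst with hst | hst
  · intro q
    unfold kP
    rw [show kIter m (j + 1) = pvStep m (kIter m j) from rfl]
    rw [show (0 : ℕ) + j = j from by omega] at hst
    rw [hst]
  · subst hst
    exact fun q => (kP_stab q).symm

theorem kIter_entry01 {m : List (List Int)} (k : ℕ) {p : ℕ × ℕ} (hp : kIn m p) :
    pvGetv (kIter m k) p = 0 ∨ pvGetv (kIter m k) p = 1 := by
  cases k with
  | zero =>
    rw [kIter, keep0_entry hp]
    split_ifs <;> simp
  | succ k =>
    rw [kIter, step_entry _ hp]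
    split_ifs <;> simp

theorem getD_in_eq {α : Type} {xs : List α} {i : ℕ} (d : α) (h : i < xs.length) :
    xs.getD i d = xs[i] := by
  simp [List.getD, List.getElem?_eq_getElem h]

theorem list2_ext {xs ys : List (List Int)} (h1 : xs.length = ys.length)
    (h2 : ∀ r, r < xs.length → (xs.getD r []).length = (ys.getD r []).length)
    (h3 : ∀ r c, r < xs.length → c < (xs.getD r []).length →
      (xs.getD r []).getD c 0 = (ys.getD r []).getD c 0) : xs = ys := by
  apply List.ext_getElem h1
  intro r hr hr'
  apply List.ext_getElem
  · have := h2 r hr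
    rw [getD_in_eq [] hr, getD_in_eq [] hr'] at this
    exact this
  · intro c hc hc'
    have := h3 r c hr (by rw [getD_in_eq [] hr]; exact hc)
    rw [getD_in_eq [] hr, getD_in_eq [] hr'] at this
    rw [getD_in_eq 0 hc, getD_in_eq 0 hc'] at this
    exact this

theorem keep_border_islands_eq {m : List (List Int)} (hpre : Pre_keep_border_islands m) :
    keep_border_islands m = keep_border_islands_alt m := by
  obtain ⟨hinv, hiff⟩ := kAState_spec hpre
  obtain ⟨k, halt, hfix⟩ := alt_char m
  have hA : keep_border_islands m = (kAState m).1 := rfl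
  rw [hA, halt]
  have hsA : kShape m (kAState m).1 := hinv.1
  have hsB : kShape m (kIter m k) := kShape_kIter m k
  apply list2_ext
  · rw [hsA.1, hsB.1]
  · intro r hr
    rw [hsA.2 r, hsB.2 r]
  · intro r c hr hc
    have hin : kIn m (r, c) := by
      refine ⟨by rw [← hsA.1]; exact hr, by rw [← hsA.2 r]; exact hc⟩
    have hlink := hinv.2.2.1 (r, c) hin
    by_cases hreach : kReach m (r, c)
    · have hv : pvVAt (kAState m).2 (r, c) = true := (hiff (r, c) hin).mpr hreach
      have hB : pvGetv (kIter m k) (r, c) = 1 := reach_kP_fix hfix hreach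
      show pvGetv (kAState m).1 (r, c) = pvGetv (kIter m k) (r, c)
      rw [hlink, hv, hB]
      simp
    · have hv : pvVAt (kAState m).2 (r, c) = false := by
        cases hb : pvVAt (kAState m).2 (r, c)
        · rfl
        · exact absurd ((hiff (r, c) hin).mp hb) hreach
      have hB : pvGetv (kIter m k) (r, c) = 0 := by
        rcases kIter_entry01 k hin with h0 | h1
        · exact h0
        · exact absurd (kP_reach k h1) hreach
      show pvGetv (kAState m).1 (r, c) = pvGetv (kIter m k) (r, c)
      rw [hlink, hv, hB]
      simp

-- ===== VERDICT (by name: the statement is the Claim_ definition above) =====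
theorem keep_border_islands_spec : Claim_equal_keep_border_islands := by
  intro matrix _ hpre
  unfold Spec_keep_border_islands
  exact keep_border_islands_eq hpre
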